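-- pv_equiv track=rewrite | github.com/vartulzeroshieldai/ComplianceShield | back-end/compliance_monitoring/report_builder.py | _get_risk_treatment_status
-- ===== SOURCE A (Python) =====
-- def _get_risk_treatment_status(risk_data):
--     """Get risk treatment status summary"""
--     treatment_status = {
--         'risks_accepted': len([r for r in risk_data if r['status'] == 'closed']),
--         'risks_mitigated': len([r for r in risk_data if r['status'] == 'mitigated']),
--         'risks_in_treatment': len([r for r in risk_data if r['status'] == 'in_progress']),
--         'risks_open': len([r for r in risk_data if r['status'] == 'open'])
--     }
--
--     return treatment_status
-- ===== SOURCE B (Python) =====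
-- def _get_risk_treatment_status(risk_data):
--     """Get risk treatment status summary (single-pass tally instead of four scans)"""
--     counts = {}
--     for r in risk_data:
--         s = r['status']
--         counts[s] = counts.get(s, 0) + 1
--     return {
--         'risks_accepted': counts.get('closed', 0),
--         'risks_mitigated': counts.get('mitigated', 0),
--         'risks_in_treatment': counts.get('in_progress', 0),
--         'risks_open': counts.get('open', 0),
--     }
-- ===== Notes on version B (the rewrite author's own statement) =====
-- stated objective: simpler
-- what changed: Replaces four separate list-comprehension scans of risk_data with a single pass that builds a status tally dict, then reads the four known statuses out of the tally.
import Mathlib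
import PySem

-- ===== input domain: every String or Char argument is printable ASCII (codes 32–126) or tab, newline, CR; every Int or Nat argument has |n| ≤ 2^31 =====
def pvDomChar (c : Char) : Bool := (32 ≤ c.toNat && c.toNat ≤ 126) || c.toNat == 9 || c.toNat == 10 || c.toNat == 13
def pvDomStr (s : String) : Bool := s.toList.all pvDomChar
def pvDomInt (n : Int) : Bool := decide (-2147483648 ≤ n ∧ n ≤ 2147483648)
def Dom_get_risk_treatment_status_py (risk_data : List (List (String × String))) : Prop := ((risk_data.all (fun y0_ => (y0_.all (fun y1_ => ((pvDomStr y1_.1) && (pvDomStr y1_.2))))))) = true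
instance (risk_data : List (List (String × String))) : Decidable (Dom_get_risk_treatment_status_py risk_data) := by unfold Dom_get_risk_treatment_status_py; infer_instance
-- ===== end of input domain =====

-- B builds one status tally in a single pass and reads the four known statuses out of it,
-- instead of A's four separate scans of risk_data.
-- Equivalence is about the return value only; neither program mutates its argument.

-- r['status'] on an association-list dict: first pair whose key is "status" (none = KeyError)
def pvStatus? (r : List (String × String)) : Option String :=
  (r.find? (fun p => p.1 == "status")).map (·.2)

-- ===== PORT A =====
def get_risk_treatment_status_py (risk_data : List (List (String × String))) : List (String × Int) :=
  [("risks_accepted", ((risk_data.filter (fun r => pvStatus? r == some "closed")).length : Int)),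
   ("risks_mitigated", ((risk_data.filter (fun r => pvStatus? r == some "mitigated")).length : Int)),
   ("risks_in_treatment", ((risk_data.filter (fun r => pvStatus? r == some "in_progress")).length : Int)),
   ("risks_open", ((risk_data.filter (fun r => pvStatus? r == some "open")).length : Int))]

-- ===== PORT B =====
-- counts[s] = counts.get(s, 0) + 1 in a single loop, then four .get lookups.
-- (Pre_ guarantees the key "status" is present, so the `.getD ""` guard never fires on admitted inputs.)
def get_risk_treatment_status_py_alt (risk_data : List (List (String × String))) : List (String × Int) :=
  let counts : PySem.Dict String Int :=
    risk_data.foldl (fun d r => d.modify ((pvStatus? r).getD "") 0 (· + 1)) PySem.Dict.empty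
  [("risks_accepted", counts.getD "closed" 0),
   ("risks_mitigated", counts.getD "mitigated" 0),
   ("risks_in_treatment", counts.getD "in_progress" 0),
   ("risks_open", counts.getD "open" 0)]

-- ===== PRECONDITION & SPEC =====
-- Pre_: every risk dict contains the key 'status'; otherwise the Python (both A and B) raises KeyError.
def Pre_get_risk_treatment_status_py (risk_data : List (List (String × String))) : Prop :=
  (risk_data.all (fun r => r.any (fun p => p.1 == "status"))) = true
instance (risk_data : List (List (String × String))) : Decidable (Pre_get_risk_treatment_status_py risk_data) := by unfold Pre_get_risk_treatment_status_py; infer_instance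
def pvWitness_get_risk_treatment_status_py : (List (List (String × String))) :=
  [[("status", "closed")], [("status", "open"), ("id", "r2")]]

def Spec_get_risk_treatment_status_py (risk_data : List (List (String × String))) (out : List (String × Int)) : Prop := out = get_risk_treatment_status_py_alt risk_data
instance (risk_data : List (List (String × String))) (out : List (String × Int)) : Decidable (Spec_get_risk_treatment_status_py risk_data out) := by unfold Spec_get_risk_treatment_status_py; infer_instance

-- ===== CLAIM (what is proved, stated in full; the proofs are below) =====
def Claim_equal_get_risk_treatment_status_py : Prop := ∀ (risk_data : List (List (String × String))), Dom_get_risk_treatment_status_py risk_data → Pre_get_risk_treatment_status_py risk_data → Spec_get_risk_treatment_status_py risk_data (get_risk_treatment_status_py risk_data)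

-- ===== LEMMAS AND PROOFS =====

-- B's tally lookup at a non-empty status s equals A's filter count.
lemma counts_getD_eq (risk_data : List (List (String × String))) (s : String) (hs : s ≠ "") :
    (risk_data.foldl (fun d r => d.modify ((pvStatus? r).getD "") 0 (· + 1))
        PySem.Dict.empty).getD s 0
      = ((risk_data.filter (fun r => pvStatus? r == some s)).length : Int) := by
  have h1 : risk_data.foldl (fun d r => d.modify ((pvStatus? r).getD "") 0 (· + 1))
        PySem.Dict.empty
      = PySem.Dict.counter (risk_data.map (fun r => (pvStatus? r).getD "")) := by
    rw [PySem.Dict.counter_eq_foldl, List.foldl_map]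
  rw [h1, PySem.Dict.getD_counter]
  congr 1
  rw [List.count_eq_countP, List.countP_map, ← List.countP_eq_length_filter]
  apply List.countP_congr
  intro r _
  cases h : pvStatus? r with
  | none => simp [Function.comp, h, (Ne.symm hs)]
  | some v => simp [Function.comp, h]

-- ===== VERDICT (by name: the statement is the Claim_ definition above) =====
theorem get_risk_treatment_status_py_spec : Claim_equal_get_risk_treatment_status_py := by
  intro risk_data _ _
  unfold Spec_get_risk_treatment_status_py get_risk_treatment_status_py get_risk_treatment_status_py_alt
  simp only [counts_getD_eq risk_data "closed" (by decide), counts_getD_eq risk_data "mitigated" (by decide),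
     counts_getD_eq risk_data "in_progress" (by decide), counts_getD_eq risk_data "open" (by decide)]
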